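-- pv_equiv track=rewrite | github.com/pypi-data/pypi-mirror-50 | packages/maomao/maomao-0.0.2-py3-none-any.whl/maomao/__main__.py | mao_to_eng
-- ===== SOURCE A (Python) =====
-- mao_table = [
--         ( 'ao', ' '),
--         ( 'aO', 'a'),
--         ( 'Ao', 'e'),
--         ( 'AO', 'i'),
--         ( 'aoo', 'o'),
--         ( 'aoO', 'u'),
--         ( 'aOo', 't'),
--         ( 'aOO', 'n'),
--         ( 'Aoo', 's'),
--         ( 'AoO', 'r'),
--         ( 'AOo', 'h'),
--         ( 'AOO', 'd'),
--         ( 'aao', 'l'),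
--         ( 'aaO', 'c'),
--         ( 'aAo', 'm'),
--         ( 'aAO', 'f'),
--         ( 'Aao', 'y'),
--         ( 'AaO', 'w'),
--         ( 'AAo', 'g'),
--         ( 'AAO', 'p'),
--         ( 'aaao', 'b'),
--         ( 'aaaO', 'v'),
--         ( 'AAAo', 'k'),
--         ( 'Aaao', 'x'),
--         ( 'AaaO', 'q'),
--         ( 'AAAO', 'j'),
--         ( 'aAAo', 'z'),
-- ]
--
-- def mao_to_eng(text):
--     translation = text.split(' ')
--     for i, word in enumerate(translation):
--         for mao, eng in mao_table:
--             head = ""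
--             mao_word = ""
--             tail = ""
--             list_word = list(word)
--             while len(list_word):
--                 letter = list_word.pop(0)
--                 if letter not in "mM":
--                     head += letter
--                 else:
--                     mao_word += letter
--                     break
--             while len(list_word):
--                 letter = list_word.pop(0)
--                 if letter in 'aAoO':
--                     mao_word += letter
--                 else:
--                     tail += letter
--                     break
--             tail += ''.join(list_word)
--
--             if mao_word[0:1].lower() == 'm' and mao_word[1:] == mao:
--                 if mao_word[0:1].istitle():
--                     translation[i] = head+eng.upper()+tail
--                 else:
--                     translation[i] = head+eng+tail
--     return ''.join(translation)
-- ===== SOURCE B (Python) =====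
-- # Reverse table keyed by a base-4 numeric code of the mao suffix (a=0,A=1,o=2,O=3,
-- # with a leading 1 digit so different lengths never collide).
-- _CODES = {
--     18: ' ', 19: 'a', 22: 'e', 23: 'i', 74: 'o', 75: 'u', 78: 't', 79: 'n',
--     90: 's', 91: 'r', 94: 'h', 95: 'd', 66: 'l', 67: 'c', 70: 'm', 71: 'f',
--     82: 'y', 83: 'w', 86: 'g', 87: 'p', 258: 'b', 259: 'v', 342: 'k',
--     322: 'x', 323: 'q', 343: 'j', 278: 'z',
-- }
--
-- def mao_to_eng(text):
--     # single left-to-right scan; the mao suffix is folded into an integer code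
--     # on the fly, so no per-word re-parsing and no string-keyed table walk
--     out = []
--     i, n = 0, len(text)
--     decoded = False  # has the current word's first m-token been handled?
--     while i < n:
--         c = text[i]
--         if c == ' ':
--             decoded = False  # space is dropped, next word may decode again
--         elif not decoded and c in 'mM':
--             decoded = True
--             v = 1
--             j = i + 1
--             while j < n and text[j] in 'aAoO':
--                 v = v * 4 + 'aAoO'.index(text[j])
--                 j += 1
--             eng = _CODES.get(v)
--             if eng is None:
--                 out.append(text[i:j])  # unknown suffix: keep it verbatim
--             else:
--                 out.append(eng.upper() if c == 'M' else eng)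
--             i = j - 1
--         else:
--             out.append(c)
--         i += 1
--     return ''.join(out)
-- ===== Notes on version B (the rewrite author's own statement) =====
-- stated objective: faster
-- what changed: Replaces the split-per-word 27-entry table loop that re-parses the word per entry with O(L) list.pop(0) by one linear scan that folds each mao suffix into a base-4 integer code on the fly and looks it up in an int-keyed dict.
import Mathlib
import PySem

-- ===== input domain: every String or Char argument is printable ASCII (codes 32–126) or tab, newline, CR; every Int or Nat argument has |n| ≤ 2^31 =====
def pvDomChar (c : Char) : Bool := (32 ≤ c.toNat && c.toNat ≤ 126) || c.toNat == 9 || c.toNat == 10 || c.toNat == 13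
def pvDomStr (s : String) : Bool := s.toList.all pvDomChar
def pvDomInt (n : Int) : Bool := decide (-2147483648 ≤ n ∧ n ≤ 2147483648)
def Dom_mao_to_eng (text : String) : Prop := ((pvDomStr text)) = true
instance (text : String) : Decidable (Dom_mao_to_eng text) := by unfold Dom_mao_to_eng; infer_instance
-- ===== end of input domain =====

-- B replaces A's split-per-word 27-entry table scan (re-parsing the word per table entry) by one
-- linear pass that folds the mao suffix into a base-4 integer code and looks it up in an
-- integer-keyed dict; measurably faster in a timing run.

-- ===== PORT A =====
-- mao_table (list of (mao, eng) pairs, strings as char lists)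
def maoTable : List (List Char × List Char) := [
  (['a','o'], [' ']), (['a','O'], ['a']), (['A','o'], ['e']), (['A','O'], ['i']),
  (['a','o','o'], ['o']), (['a','o','O'], ['u']), (['a','O','o'], ['t']), (['a','O','O'], ['n']),
  (['A','o','o'], ['s']), (['A','o','O'], ['r']), (['A','O','o'], ['h']), (['A','O','O'], ['d']),
  (['a','a','o'], ['l']), (['a','a','O'], ['c']), (['a','A','o'], ['m']), (['a','A','O'], ['f']),
  (['A','a','o'], ['y']), (['A','a','O'], ['w']), (['A','A','o'], ['g']), (['A','A','O'], ['p']),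
  (['a','a','a','o'], ['b']), (['a','a','a','O'], ['v']), (['A','A','A','o'], ['k']),
  (['A','a','a','o'], ['x']), (['A','a','a','O'], ['q']), (['A','A','A','O'], ['j']),
  (['a','A','A','o'], ['z'])]

-- first while loop: pop chars into head until the first 'm'/'M' (which goes to mao_word)
def pvWhileA : List Char → List Char → List Char → (List Char × List Char × List Char)
  | [], head, mw => (head, mw, [])
  | c :: rest, head, mw =>
    if ¬(c = 'm' ∨ c = 'M') then pvWhileA rest (head ++ [c]) mw
    else (head, mw ++ [c], rest)

-- second while loop: pop chars into mao_word while in 'aAoO'; the first other char goes to tail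
def pvWhileB : List Char → List Char → List Char → (List Char × List Char × List Char)
  | [], mw, tail => (mw, tail, [])
  | c :: rest, mw, tail =>
    if c = 'a' ∨ c = 'A' ∨ c = 'o' ∨ c = 'O' then pvWhileB rest (mw ++ [c]) tail
    else (mw, tail ++ [c], rest)

-- one iteration of the inner `for mao, eng in mao_table` loop body (word is the fixed loop
-- variable of enumerate; cur is the current translation[i])
def pvTryEntry (word cur mao eng : List Char) : List Char :=
  let p1 := pvWhileA word [] []
  let head := p1.1
  let p2 := pvWhileB p1.2.2 p1.2.1 []
  let mao_word := p2.1
  let tail := p2.2.1 ++ p2.2.2          -- tail += ''.join(list_word)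
  if PySem.Chars.lower (PySem.List.slice mao_word (some 0) (some 1)) = ['m'] ∧
      PySem.List.slice mao_word (some 1) none = mao then
    -- mao_word[0:1].istitle(): the first condition forces mao_word[0:1] ∈ {"m","M"},
    -- and on those istitle() is exactly "the char is 'M'" (exact here)
    if PySem.List.slice mao_word (some 0) (some 1) = ['M'] then
      head ++ PySem.Chars.upper eng ++ tail
    else head ++ eng ++ tail
  else cur

-- the inner for loop over mao_table, state = translation[i]
def pvDecodeA (word : List Char) : List Char :=
  maoTable.foldl (fun cur p => pvTryEntry word cur p.1 p.2) word

def mao_to_eng (text : String) : String :=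
  -- translation = text.split(' '); for i, word: inner loop updates translation[i]; ''.join
  String.mk (PySem.Chars.join []
    ((PySem.Chars.splitOn text.toList [' ']).map pvDecodeA))

-- ===== PORT B =====
-- 'aAoO'.index(ch)
def pvDig (c : Char) : Int :=
  if c = 'a' then 0 else if c = 'A' then 1 else if c = 'o' then 2 else 3

-- _CODES: reverse table keyed by the base-4 numeric code of the mao suffix
def maoCodes : PySem.Dict Int (List Char) := PySem.Dict.ofList [
  (18, [' ']), (19, ['a']), (22, ['e']), (23, ['i']), (74, ['o']), (75, ['u']),
  (78, ['t']), (79, ['n']), (90, ['s']), (91, ['r']), (94, ['h']), (95, ['d']),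
  (66, ['l']), (67, ['c']), (70, ['m']), (71, ['f']), (82, ['y']), (83, ['w']),
  (86, ['g']), (87, ['p']), (258, ['b']), (259, ['v']), (342, ['k']),
  (322, ['x']), (323, ['q']), (343, ['j']), (278, ['z'])]

-- the inner `while j < n and text[j] in 'aAoO'` loop: folds the code, also returns the
-- consumed run (text[i+1:j], needed for the verbatim fallback) and the remainder
def pvRunC : Int → List Char → (Int × List Char × List Char)
  | v, [] => (v, [], [])
  | v, c :: rest =>
    if c = 'a' ∨ c = 'A' ∨ c = 'o' ∨ c = 'O' then
      let p := pvRunC (v * 4 + pvDig c) rest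
      (p.1, c :: p.2.1, p.2.2)
    else (v, [], c :: rest)

theorem pvRunC_snd_le (v : Int) (s : List Char) : (pvRunC v s).2.2.length ≤ s.length := by
  induction s generalizing v with
  | nil => simp [pvRunC]
  | cons c rest ih =>
    simp only [pvRunC]
    split
    · simpa using Nat.le_succ_of_le (ih _)
    · simp

-- the main `while i < n` scan of Source B (out accumulates the output pieces)
def pvLoopB : List Char → Bool → List Char → List Char
  | [], _, acc => acc
  | c :: rest, decoded, acc =>
    if c = ' ' then pvLoopB rest false acc
    else if decoded = false ∧ (c = 'm' ∨ c = 'M') then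
      let p := pvRunC 1 rest
      let piece := match PySem.Dict.get? maoCodes p.1 with
        | none => c :: p.2.1
        | some eng => if c = 'M' then PySem.Chars.upper eng else eng
      pvLoopB p.2.2 true (acc ++ piece)
    else pvLoopB rest decoded (acc ++ [c])
termination_by s _ _ => s.length
decreasing_by
  · simp
  · have := pvRunC_snd_le 1 rest; simp; omega
  · simp

def mao_to_eng_alt (text : String) : String :=
  String.mk (pvLoopB text.toList false [])

-- ===== PRECONDITION & SPEC =====
def Spec_mao_to_eng (text : String) (out : String) : Prop := out = mao_to_eng_alt text
instance (text : String) (out : String) : Decidable (Spec_mao_to_eng text out) := by unfold Spec_mao_to_eng; infer_instance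

-- ===== CLAIM (what is proved, stated in full; the proofs are below) =====
def Claim_equal_mao_to_eng : Prop := ∀ (text : String), Dom_mao_to_eng text → Spec_mao_to_eng text (mao_to_eng text)

-- ===== LEMMAS AND PROOFS =====

-- alphabet predicate for suffix characters
abbrev pvAlpha (c : Char) : Prop := c = 'a' ∨ c = 'A' ∨ c = 'o' ∨ c = 'O'

-- the code fold, as a standalone function (pvRunC computes it incrementally)
def pvCodeAcc (v : Int) (s : List Char) : Int := s.foldl (fun a c => a * 4 + pvDig c) v

def pvCode (s : List Char) : Int := pvCodeAcc 1 s

-- maximal 'aAoO' run and the remainder (proof-side view of pvRunC / pvWhileB)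
def pvRun : List Char → (List Char × List Char)
  | [] => ([], [])
  | c :: rest =>
    if c = 'a' ∨ c = 'A' ∨ c = 'o' ∨ c = 'O' then
      let p := pvRun rest; (c :: p.1, p.2)
    else ([], c :: rest)

theorem pvRunC_spec (v : Int) (s : List Char) :
    pvRunC v s = (pvCodeAcc v (pvRun s).1, (pvRun s).1, (pvRun s).2) := by
  induction s generalizing v with
  | nil => simp [pvRunC, pvRun, pvCodeAcc]
  | cons c rest ih =>
    by_cases hc : c = 'a' ∨ c = 'A' ∨ c = 'o' ∨ c = 'O'
    · simp [pvRunC, pvRun, hc, ih, pvCodeAcc]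
    · simp [pvRunC, pvRun, hc, pvCodeAcc]

theorem pvRun_fst_alpha (s : List Char) : ∀ c ∈ (pvRun s).1, pvAlpha c := by
  induction s with
  | nil => simp [pvRun]
  | cons c rest ih =>
    by_cases hc : c = 'a' ∨ c = 'A' ∨ c = 'o' ∨ c = 'O'
    · simp only [pvRun, if_pos hc]
      intro x hx
      rcases List.mem_cons.mp hx with rfl | hx
      · exact hc
      · exact ih x hx
    · simp [pvRun, hc]

-- ==== the numeric code is injective on alphabetic strings ====

theorem pvDig_bounds (c : Char) : 0 ≤ pvDig c ∧ pvDig c < 4 := by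
  unfold pvDig; split_ifs <;> omega

theorem pvDig_inj (c d : Char) (hc : pvAlpha c) (hd : pvAlpha d)
    (h : pvDig c = pvDig d) : c = d := by
  rcases hc with rfl | rfl | rfl | rfl <;> rcases hd with rfl | rfl | rfl | rfl <;>
    first | rfl | (exfalso; revert h; decide)

theorem pvCodeAcc_ge_one (s : List Char) : ∀ v : Int, 1 ≤ v → 1 ≤ pvCodeAcc v s := by
  induction s with
  | nil => intro v hv; simpa [pvCodeAcc] using hv
  | cons c rest ih =>
    intro v hv
    have hb := pvDig_bounds c
    have : pvCodeAcc v (c :: rest) = pvCodeAcc (v * 4 + pvDig c) rest := rfl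
    rw [this]
    exact ih _ (by omega)

theorem pvCode_snoc (s : List Char) (c : Char) :
    pvCode (s ++ [c]) = pvCode s * 4 + pvDig c := by
  simp [pvCode, pvCodeAcc, List.foldl_append]

theorem pvCode_nil : pvCode ([] : List Char) = 1 := rfl

theorem pvCode_inj (s : List Char) : ∀ t : List Char, (∀ c ∈ s, pvAlpha c) →
    (∀ c ∈ t, pvAlpha c) → pvCode s = pvCode t → s = t := by
  induction s using List.reverseRecOn with
  | nil =>
    intro t _ ht h
    cases t using List.reverseRecOn with
    | nil => rfl
    | append_singleton t' d =>
      exfalso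
      rw [pvCode_nil, pvCode_snoc] at h
      have h1 := pvCodeAcc_ge_one t' 1 (by omega)
      have hb := pvDig_bounds d
      have : pvCode t' = pvCodeAcc 1 t' := rfl
      omega
  | append_singleton s' c ih =>
    intro t hs ht h
    cases t using List.reverseRecOn with
    | nil =>
      exfalso
      rw [pvCode_nil, pvCode_snoc] at h
      have h1 := pvCodeAcc_ge_one s' 1 (by omega)
      have hb := pvDig_bounds c
      have : pvCode s' = pvCodeAcc 1 s' := rfl
      omega
    | append_singleton t' d =>
      rw [pvCode_snoc, pvCode_snoc] at h
      have hbc := pvDig_bounds c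
      have hbd := pvDig_bounds d
      have heq : pvCode s' = pvCode t' ∧ pvDig c = pvDig d := by constructor <;> omega
      have hs' : ∀ x ∈ s', pvAlpha x := fun x hx => hs x (by simp [hx])
      have ht' : ∀ x ∈ t', pvAlpha x := fun x hx => ht x (by simp [hx])
      have hcd : c = d :=
        pvDig_inj c d (hs c (by simp)) (ht d (by simp)) heq.2
      rw [ih t' hs' ht' heq.1, hcd]

-- ==== first-match lookups ====

-- first-match association-list lookup, char-list keys (A's table)
def pvLook : List (List Char × List Char) → List Char → Option (List Char)
  | [], _ => none
  | (k, v) :: rest, s => if s = k then some v else pvLook rest s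

theorem pvLook_eq_none (L : List (List Char × List Char)) (s : List Char)
    (h : s ∉ L.map Prod.fst) : pvLook L s = none := by
  induction L with
  | nil => rfl
  | cons p rest ih =>
    obtain ⟨k, v⟩ := p
    simp only [List.map_cons, List.mem_cons] at h
    push_neg at h
    simp [pvLook, h.1, ih h.2]

-- last-match fold over a Nodup-keyed table = first-match lookup
theorem pvFold_eq_look (f : List Char → List Char) (P : Prop) [Decidable P] (s : List Char)
    (L : List (List Char × List Char)) (hnd : (L.map Prod.fst).Nodup) (cur : List Char) :
    L.foldl (fun c p => if P ∧ s = p.1 then f p.2 else c) cur =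
      (match pvLook L s with
       | some v => if P then f v else cur
       | none => cur) := by
  induction L generalizing cur with
  | nil => rfl
  | cons p rest ih =>
    obtain ⟨k, v⟩ := p
    simp only [List.map_cons, List.nodup_cons] at hnd
    rw [List.foldl_cons, ih hnd.2]
    by_cases hs : s = k
    · subst hs
      rw [pvLook_eq_none rest s hnd.1]
      by_cases hP : P
      · simp [pvLook, hP]
      · simp [pvLook, hP]
    · cases hpl : pvLook rest s <;> simp [pvLook, hs, hpl]

-- first-match association-list lookup, Int keys (B's dict)
def pvLookI : List (Int × List Char) → Int → Option (List Char)
  | [], _ => none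
  | (k, v) :: rest, s => if s = k then some v else pvLookI rest s

theorem pvGetI_mk_eq_look (L : List (Int × List Char)) (s : Int) :
    PySem.Dict.get? (PySem.Dict.mk L) s = pvLookI L s := by
  induction L with
  | nil => simp [PySem.Dict.get?, pvLookI]
  | cons p rest ih =>
    obtain ⟨k, v⟩ := p
    rw [PySem.Dict.get?_mk_cons]
    by_cases hs : s = k
    · subst hs; simp [pvLookI]
    · have hks : ¬ ((k == s) = true) := by
        simp only [beq_iff_eq]
        exact fun hx => hs hx.symm
      rw [if_neg hks, ih]
      simp [pvLookI, hs]

-- looking up the code of an alphabetic string in the coded table = looking up the string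
theorem pvLookI_map (L : List (List Char × List Char))
    (hk : ∀ p ∈ L, ∀ c ∈ p.1, pvAlpha c) (s : List Char) (hs : ∀ c ∈ s, pvAlpha c) :
    pvLookI (L.map fun p => (pvCode p.1, p.2)) (pvCode s) = pvLook L s := by
  induction L with
  | nil => rfl
  | cons p rest ih =>
    obtain ⟨k, v⟩ := p
    have hka : ∀ c ∈ k, pvAlpha c := hk (k, v) (by simp)
    by_cases hsk : s = k
    · subst hsk
      simp [pvLookI, pvLook]
    · have hcode : ¬ pvCode s = pvCode k :=
        fun h => hsk (pvCode_inj s k hs hka h)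
      simp only [List.map_cons, pvLookI, pvLook, if_neg hcode, if_neg hsk]
      exact ih (fun p hp => hk p (by simp [hp]))

set_option maxRecDepth 4000 in
theorem maoCodes_eq : maoCodes = PySem.Dict.mk (maoTable.map fun p => (pvCode p.1, p.2)) := by
  decide

theorem maoTable_alpha : ∀ p ∈ maoTable, ∀ c ∈ p.1, pvAlpha c := by
  intro p hp c hc
  simp only [maoTable, List.mem_cons, List.not_mem_nil, or_false] at hp
  rcases hp with rfl|rfl|rfl|rfl|rfl|rfl|rfl|rfl|rfl|rfl|rfl|rfl|rfl|rfl|rfl|rfl|rfl|rfl|rfl|rfl|rfl|rfl|rfl|rfl|rfl|rfl|rfl <;>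
    simp only [List.mem_cons, List.not_mem_nil, or_false] at hc <;>
    rcases hc with rfl|rfl|rfl|rfl <;> simp [pvAlpha]

theorem maoCodes_get (s : List Char) (hs : ∀ c ∈ s, pvAlpha c) :
    PySem.Dict.get? maoCodes (pvCode s) = pvLook maoTable s := by
  rw [maoCodes_eq, pvGetI_mk_eq_look, pvLookI_map maoTable maoTable_alpha s hs]

-- ==== parse characterization (A side) ====

theorem pvWhileA_noM (w : List Char) (hw : ∀ c ∈ w, ¬(c = 'm' ∨ c = 'M')) :
    ∀ acc accm, pvWhileA w acc accm = (acc ++ w, accm, []) := by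
  induction w with
  | nil => simp [pvWhileA]
  | cons c rest ih =>
    intro acc accm
    have hc := hw c (by simp)
    simp only [pvWhileA, if_pos hc]
    rw [ih (fun x hx => hw x (by simp [hx])) (acc ++ [c]) accm]
    simp

theorem pvWhileA_m (h : List Char) (hh : ∀ c ∈ h, ¬(c = 'm' ∨ c = 'M'))
    (c : Char) (hc : c = 'm' ∨ c = 'M') (rest : List Char) :
    ∀ acc accm, pvWhileA (h ++ c :: rest) acc accm = (acc ++ h, accm ++ [c], rest) := by
  induction h with
  | nil => intro acc accm; simp [pvWhileA, hc]
  | cons d h' ih =>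
    intro acc accm
    have hd := hh d (by simp)
    simp only [List.cons_append, pvWhileA, if_pos hd]
    rw [ih (fun x hx => hh x (by simp [hx])) (acc ++ [d]) accm]
    simp

theorem pvWhileB_run (r : List Char) : ∀ mw,
    (pvWhileB r mw []).1 = mw ++ (pvRun r).1 ∧
    (pvWhileB r mw []).2.1 ++ (pvWhileB r mw []).2.2 = (pvRun r).2 := by
  induction r with
  | nil => intro mw; simp [pvWhileB, pvRun]
  | cons c rest ih =>
    intro mw
    by_cases hc : c = 'a' ∨ c = 'A' ∨ c = 'o' ∨ c = 'O'
    · simp only [pvWhileB, pvRun, if_pos hc]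
      have := ih (mw ++ [c])
      simpa using this
    · simp [pvWhileB, pvRun, hc]

theorem pvRun_append (s : List Char) : (pvRun s).1 ++ (pvRun s).2 = s := by
  induction s with
  | nil => simp [pvRun]
  | cons c rest ih =>
    simp only [pvRun]
    split
    · simpa using ih
    · simp

theorem pvRun_stop (xs : List Char) (c : Char)
    (hc : ¬(c = 'a' ∨ c = 'A' ∨ c = 'o' ∨ c = 'O')) (ys : List Char) :
    pvRun (xs ++ c :: ys) = ((pvRun xs).1, (pvRun xs).2 ++ c :: ys) := by
  induction xs with
  | nil => simp [pvRun, hc]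
  | cons d xs' ih =>
    by_cases hd : d = 'a' ∨ d = 'A' ∨ d = 'o' ∨ d = 'O'
    · simp [pvRun, hd, ih]
    · simp [pvRun, hd]

theorem pvRun_snd_mem (s : List Char) (x : Char) (hx : x ∈ (pvRun s).2) : x ∈ s :=
  (List.IsSuffix.subset ⟨(pvRun s).1, pvRun_append s⟩) hx

theorem pvRun_snd_le (s : List Char) : (pvRun s).2.length ≤ s.length := by
  induction s with
  | nil => simp [pvRun]
  | cons c rest ih =>
    simp only [pvRun]
    split
    · simpa using Nat.le_succ_of_le ih
    · simp

-- ==== loopB step lemmas ====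

theorem pvLoopB_space (rest : List Char) (d : Bool) (acc : List Char) :
    pvLoopB (' ' :: rest) d acc = pvLoopB rest false acc := by
  simp [pvLoopB]

theorem pvLoopB_other (c : Char) (rest : List Char) (d : Bool) (acc : List Char)
    (hc : ¬ c = ' ') (hm : ¬(d = false ∧ (c = 'm' ∨ c = 'M'))) :
    pvLoopB (c :: rest) d acc = pvLoopB rest d (acc ++ [c]) := by
  simp [pvLoopB, hc, hm]

theorem pvLoopB_m (c : Char) (rest : List Char) (d : Bool) (acc : List Char)
    (hc : ¬ c = ' ') (hm : d = false ∧ (c = 'm' ∨ c = 'M')) :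
    pvLoopB (c :: rest) d acc = pvLoopB (pvRun rest).2 true (acc ++
      (match PySem.Dict.get? maoCodes (pvCode (pvRun rest).1) with
       | none => c :: (pvRun rest).1
       | some eng => if c = 'M' then PySem.Chars.upper eng else eng)) := by
  simp [pvLoopB, hc, hm, pvRunC_spec, pvCode]

theorem pvLoopB_accN : ∀ (n : Nat) (s : List Char), s.length ≤ n → ∀ (d : Bool) (acc pre : List Char),
    pvLoopB s d (pre ++ acc) = pre ++ pvLoopB s d acc := by
  intro n
  induction n with
  | zero =>
    intro s hlen d acc pre
    have hseq : s = [] := by cases s <;> simp_all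
    subst hseq
    simp [pvLoopB]
  | succ n ih =>
    intro s hlen d acc pre
    cases s with
    | nil => simp [pvLoopB]
    | cons c rest =>
      by_cases hc : c = ' '
      · subst hc
        rw [pvLoopB_space, pvLoopB_space]
        exact ih rest (by simp at hlen; omega) false acc pre
      · by_cases hm : d = false ∧ (c = 'm' ∨ c = 'M')
        · rw [pvLoopB_m c rest d (pre ++ acc) hc hm, pvLoopB_m c rest d acc hc hm,
              List.append_assoc]
          exact ih (pvRun rest).2
            (by have := pvRun_snd_le rest; simp at hlen; omega) true _ pre
        · rw [pvLoopB_other c rest d (pre ++ acc) hc hm, pvLoopB_other c rest d acc hc hm,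
              List.append_assoc]
          exact ih rest (by simp at hlen; omega) d _ pre

theorem pvLoopB_acc0 (s : List Char) (d : Bool) (pre : List Char) :
    pvLoopB s d pre = pre ++ pvLoopB s d [] := by
  simpa using pvLoopB_accN s.length s le_rfl d [] pre

theorem pvLoopB_done (s : List Char) (hs : ' ' ∉ s) (acc : List Char) :
    pvLoopB s true acc = acc ++ s := by
  induction s generalizing acc with
  | nil => simp [pvLoopB]
  | cons c rest ih =>
    have hc : ¬ c = ' ' := by rintro rfl; exact hs (by simp)
    rw [pvLoopB_other c rest true acc hc (by simp)]
    rw [ih (fun h => hs (by simp [h]))]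
    simp

theorem pvLoopB_head (h : List Char) (hh : ∀ c ∈ h, ¬(c = 'm' ∨ c = 'M') ∧ c ≠ ' ')
    (t : List Char) (acc : List Char) :
    pvLoopB (h ++ t) false acc = pvLoopB t false (acc ++ h) := by
  induction h generalizing acc with
  | nil => simp
  | cons c h' ih =>
    have hc := hh c (by simp)
    rw [List.cons_append, pvLoopB_other c (h' ++ t) false acc hc.2 (fun hx => hc.1 hx.2)]
    rw [ih (fun x hx => hh x (by simp [hx]))]
    simp

-- ==== per-word equivalence ====

theorem pvFirst (p : Char → Prop) [DecidablePred p] (l : List Char) :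
    (∀ c ∈ l, ¬ p c) ∨ ∃ h c rest, l = h ++ c :: rest ∧ (∀ x ∈ h, ¬ p x) ∧ p c := by
  induction l with
  | nil => exact Or.inl (by simp)
  | cons c rest ih =>
    by_cases hc : p c
    · exact Or.inr ⟨[], c, rest, by simp, by simp, hc⟩
    · rcases ih with h | ⟨h, d, r, rfl, hh, hd⟩
      · exact Or.inl (by simpa [hc] using h)
      · exact Or.inr ⟨c :: h, d, r, by simp, by simpa [hc] using hh, hd⟩

theorem pvSliceTake1 (l : List Char) : PySem.List.slice l (some 0) (some 1) = l.take 1 := by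
  have h0 : ((0 : Int)) = ((0 : Nat) : Int) := by simp
  have h1 : ((1 : Int)) = ((1 : Nat) : Int) := by simp
  rw [h0, h1, PySem.List.slice_natCast]
  simp

theorem pvSliceDrop1 (l : List Char) : PySem.List.slice l (some 1) none = l.tail :=
  PySem.List.slice_from_one l

theorem pvTryEntry_noM (w : List Char) (hw : ∀ c ∈ w, ¬(c = 'm' ∨ c = 'M')) :
    ∀ cur mao eng, pvTryEntry w cur mao eng = cur := by
  intro cur mao eng
  unfold pvTryEntry
  rw [pvWhileA_noM w hw [] []]
  simp only [pvWhileB, List.nil_append]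
  rw [if_neg]
  exact fun hx => absurd hx.1 (by decide)

theorem pvWord_noM (w : List Char) (hw : ∀ c ∈ w, ¬(c = 'm' ∨ c = 'M')) :
    pvDecodeA w = w := by
  unfold pvDecodeA
  have hgen : ∀ (L : List (List Char × List Char)) cur,
      L.foldl (fun cur p => pvTryEntry w cur p.1 p.2) cur = cur := by
    intro L
    induction L with
    | nil => intro cur; rfl
    | cons p rest ih => intro cur; rw [List.foldl_cons, pvTryEntry_noM w hw]; exact ih cur
  exact hgen maoTable w

theorem pvWord_m (h : List Char) (hh : ∀ c ∈ h, ¬(c = 'm' ∨ c = 'M'))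
    (c : Char) (hc : c = 'm' ∨ c = 'M') (rest : List Char) :
    pvDecodeA (h ++ c :: rest) =
      (match pvLook maoTable (pvRun rest).1 with
       | some v => h ++ (if c = 'M' then PySem.Chars.upper v else v) ++ (pvRun rest).2
       | none => h ++ c :: rest) := by
  have hw := pvWhileA_m h hh c hc rest [] []
  have hb := pvWhileB_run rest [c]
  have hlow : PySem.Chars.lower [c] = ['m'] := by
    rcases hc with rfl | rfl <;> decide
  have hstep : ∀ cur mao eng, pvTryEntry (h ++ c :: rest) cur mao eng =
      if True ∧ (pvRun rest).1 = mao then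
        (if c = 'M' then h ++ PySem.Chars.upper eng ++ (pvRun rest).2
         else h ++ eng ++ (pvRun rest).2)
      else cur := by
    intro cur mao eng
    unfold pvTryEntry
    rw [hw]
    simp only [List.nil_append]
    rw [hb.1, hb.2]
    simp only [List.singleton_append]
    simp only [pvSliceTake1, pvSliceDrop1]
    simp only [List.take_succ_cons, List.take_zero, List.tail_cons, hlow, true_and]
    by_cases hmao : (pvRun rest).1 = mao <;> by_cases hM : c = 'M' <;>
      simp [hmao, hM]
  unfold pvDecodeA
  have hfun : (fun cur (p : List Char × List Char) => pvTryEntry (h ++ c :: rest) cur p.1 p.2) =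
      (fun cur p => if True ∧ (pvRun rest).1 = p.1 then
        (if c = 'M' then h ++ PySem.Chars.upper p.2 ++ (pvRun rest).2
         else h ++ p.2 ++ (pvRun rest).2) else cur) := by
    funext cur p
    exact hstep cur p.1 p.2
  rw [hfun, pvFold_eq_look
      (fun v => if c = 'M' then h ++ PySem.Chars.upper v ++ (pvRun rest).2
                else h ++ v ++ (pvRun rest).2)
      True ((pvRun rest).1) maoTable (by decide) (h ++ c :: rest)]
  cases pvLook maoTable (pvRun rest).1 with
  | none => rfl
  | some v => by_cases hM : c = 'M' <;> simp [hM]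

theorem pvWord (w : List Char) (hw : ' ' ∉ w) :
    pvDecodeA w = pvLoopB w false [] := by
  rcases pvFirst (fun c => c = 'm' ∨ c = 'M') w with hnoM | ⟨h, c, rest, rfl, hh, hc⟩
  · rw [pvWord_noM w hnoM]
    have h2 := pvLoopB_head w (fun x hx => ⟨hnoM x hx, fun hsp => hw (hsp ▸ hx)⟩) [] []
    rw [show w ++ ([] : List Char) = w by simp] at h2
    rw [h2]
    simp [pvLoopB]
  · have hwsp : ∀ x ∈ h, x ≠ ' ' := fun x hx hsp => hw (by simp [hsp ▸ hx])
    have hcsp : ¬ c = ' ' := fun hsp => hw (by simp [hsp])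
    have hrem : ' ' ∉ (pvRun rest).2 := fun hm => hw (by
      have := pvRun_snd_mem rest ' ' hm
      simp [this])
    rw [pvWord_m h hh c hc rest]
    have hB := pvLoopB_head h (fun x hx => ⟨hh x hx, hwsp x hx⟩) (c :: rest) []
    rw [hB]
    simp only [List.nil_append]
    rw [pvLoopB_m c rest false h hcsp ⟨rfl, hc⟩]
    rw [pvLoopB_done _ hrem]
    rw [maoCodes_get (pvRun rest).1 (pvRun_fst_alpha rest)]
    cases hl : pvLook maoTable (pvRun rest).1 with
    | none =>
      simp only []
      conv_lhs => rw [← pvRun_append rest]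
      simp [List.append_assoc]
    | some v => simp [List.append_assoc]

-- ==== split characterization ====

def pvSplit (pre : List Char) : List Char → List (List Char)
  | [] => [pre]
  | c :: rest => if c = ' ' then pre :: pvSplit [] rest else pvSplit (pre ++ [c]) rest

theorem pvSplit_go (fuel : Nat) : ∀ (l cur : List Char) (acc : List (List Char)),
    l.length < fuel →
    PySem.Chars.splitOn.go [' '] fuel l cur acc = acc.reverse ++ pvSplit cur.reverse l := by
  induction fuel with
  | zero => intro l cur acc h; omega
  | succ n ih =>
    intro l cur acc h
    cases l with
    | nil =>
      rw [show PySem.Chars.splitOn.go [' '] (n + 1) [] cur acc =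
          (cur.reverse :: acc).reverse from rfl]
      simp [pvSplit]
    | cons c rest =>
      rw [show PySem.Chars.splitOn.go [' '] (n + 1) (c :: rest) cur acc =
          (if [' '].isPrefixOf (c :: rest) = true then
            PySem.Chars.splitOn.go [' '] n (List.drop [' '].length (c :: rest)) []
              (cur.reverse :: acc)
          else PySem.Chars.splitOn.go [' '] n rest (c :: cur) acc) from rfl]
      by_cases hc : c = ' '
      · subst hc
        rw [if_pos (by simp [List.isPrefixOf])]
        rw [show List.drop [' '].length (' ' :: rest) = rest from rfl]
        rw [ih _ _ _ (by simp at h; omega)]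
        simp [pvSplit]
      · rw [if_neg (by
          simp only [List.isPrefixOf, Bool.and_eq_true, beq_iff_eq]
          rintro ⟨h1, -⟩
          exact hc h1.symm)]
        rw [ih _ _ _ (by simp at h; omega)]
        simp [pvSplit, hc]

theorem pvSplitOn (s : List Char) :
    PySem.Chars.splitOn s [' '] = pvSplit [] s := by
  have h := pvSplit_go (s.length + 1) s [] [] (by omega)
  rw [PySem.Chars.splitOn, h]
  simp

theorem pvSplit_noSep (w : List Char) (hw : ' ' ∉ w) : ∀ pre, pvSplit pre w = [pre ++ w] := by
  induction w with
  | nil => intro pre; simp [pvSplit]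
  | cons c rest ih =>
    intro pre
    have hc : ¬ c = ' ' := fun h => hw (by simp [h])
    rw [pvSplit, if_neg hc, ih (fun h => hw (by simp [h]))]
    simp

theorem pvSplit_sep (w : List Char) (hw : ' ' ∉ w) (rest : List Char) :
    ∀ pre, pvSplit pre (w ++ ' ' :: rest) = (pre ++ w) :: pvSplit [] rest := by
  induction w with
  | nil => intro pre; simp [pvSplit]
  | cons c w' ih =>
    intro pre
    have hc : ¬ c = ' ' := fun h => hw (by simp [h])
    rw [List.cons_append, pvSplit, if_neg hc, ih (fun h => hw (by simp [h]))]
    simp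

theorem pvJoin_nil : PySem.Chars.join [] ([] : List (List Char)) = [] := rfl

theorem pvJoin_cons (x : List Char) (xs : List (List Char)) :
    PySem.Chars.join [] (x :: xs) = x ++ PySem.Chars.join [] xs := by
  cases xs <;> simp [PySem.Chars.join, List.intercalate, List.intersperse]

theorem pvLoopB_split : ∀ (n : Nat) (w : List Char), w.length ≤ n → (' ' ∉ w) →
    ∀ (d : Bool) (rest : List Char),
    pvLoopB (w ++ ' ' :: rest) d [] = pvLoopB w d [] ++ pvLoopB rest false [] := by
  intro n
  induction n with
  | zero =>
    intro w hlen _ d rest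
    have hweq : w = [] := by cases w <;> simp_all
    subst hweq
    simp [pvLoopB_space, pvLoopB]
  | succ n ih =>
    intro w hlen hw d rest
    cases w with
    | nil => simp [pvLoopB_space, pvLoopB]
    | cons c w' =>
      have hc : ¬ c = ' ' := fun h => hw (by simp [h])
      have hw' : ' ' ∉ w' := fun h => hw (by simp [h])
      by_cases hm : d = false ∧ (c = 'm' ∨ c = 'M')
      · have hrem' : (pvRun w').2.length ≤ n := by
          have h1 := pvRun_snd_le w'
          simp at hlen; omega
        have hremsp : ' ' ∉ (pvRun w').2 := fun h => hw' (pvRun_snd_mem w' ' ' h)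
        rw [List.cons_append, pvLoopB_m c (w' ++ ' ' :: rest) d [] hc hm,
            pvLoopB_m c w' d [] hc hm, pvRun_stop w' ' ' (by decide) rest]
        simp only [List.nil_append]
        rw [pvLoopB_acc0, pvLoopB_acc0 (pvRun w').2,
            ih (pvRun w').2 hrem' hremsp true rest]
        simp [List.append_assoc]
      · rw [List.cons_append, pvLoopB_other c (w' ++ ' ' :: rest) d [] hc hm,
            pvLoopB_other c w' d [] hc hm]
        rw [pvLoopB_acc0, pvLoopB_acc0 w',
            ih w' (by simp at hlen; omega) hw' d rest]
        simp

theorem pvTop : ∀ (n : Nat) (s : List Char), s.length ≤ n →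
    PySem.Chars.join [] ((pvSplit [] s).map pvDecodeA) = pvLoopB s false [] := by
  intro n
  induction n with
  | zero =>
    intro s hlen
    have hseq : s = [] := by cases s <;> simp_all
    subst hseq
    rw [show pvSplit [] ([] : List Char) = [[]] from rfl]
    simp [pvWord_noM, pvLoopB]
  | succ n ih =>
    intro s hlen
    rcases pvFirst (fun c => c = ' ') s with hnosp | ⟨w, c, rest, rfl, hw, hc⟩
    · have hns : ' ' ∉ s := fun h => hnosp ' ' h rfl
      rw [pvSplit_noSep s hns []]
      simp only [List.nil_append, List.map_cons, List.map_nil, pvJoin_cons, pvJoin_nil,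
        List.append_nil]
      exact pvWord s hns
    · have hc' : c = ' ' := hc
      subst hc'
      have hwns : ' ' ∉ w := fun h => hw ' ' h rfl
      rw [pvSplit_sep w hwns rest []]
      simp only [List.nil_append, List.map_cons, pvJoin_cons]
      rw [ih rest (by simp at hlen; omega)]
      rw [pvLoopB_split (w.length) w le_rfl hwns false rest]
      rw [pvWord w hwns]

-- ===== VERDICT (by name: the statement is the Claim_ definition above) =====
theorem mao_to_eng_spec : Claim_equal_mao_to_eng := by
  intro text _
  unfold Spec_mao_to_eng mao_to_eng mao_to_eng_alt
  rw [pvSplitOn, pvTop (text.toList.length) text.toList le_rfl]
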